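-- pv_equiv track=rewrite | github.com/NineMeen/Cisco-Web-application-Network-Automation | app.py | subnetmask_dropdown
-- ===== SOURCE A (Python) =====
-- def subnetmask_dropdown(name, id, mask=None):
--     options = [
--         ('0.0.0.0', '/0'),
--         ('255.0.0.0', '/8'),
--         ('255.128.0.0', '/9'),
--         ('255.192.0.0', '/10'),
--         ('255.224.0.0', '/11'),
--         ('255.240.0.0', '/12'),
--         ('255.248.0.0', '/13'),
--         ('255.252.0.0', '/14'),
--         ('255.254.0.0', '/15'),
--         ('255.255.0.0', '/16'),
--         ('255.255.128.0', '/17'),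
--         ('255.255.192.0', '/18'),
--         ('255.255.224.0', '/19'),
--         ('255.255.240.0', '/20'),
--         ('255.255.248.0', '/21'),
--         ('255.255.252.0', '/22'),
--         ('255.255.254.0', '/23'),
--         ('255.255.255.0', '/24'),
--         ('255.255.255.128', '/25'),
--         ('255.255.255.192', '/26'),
--         ('255.255.255.224', '/27'),
--         ('255.255.255.240', '/28'),
--         ('255.255.255.248', '/29'),
--         ('255.255.255.252', '/30'),
--         ('255.255.255.254', '/31'),
--         ('255.255.255.255', '/32')
--     ]
--     select_html = f'<select name="{name}" id="{id}" class="form-select" required>'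
--     for value, text in options:
--         selected = ' selected' if mask and mask == value else ''
--         select_html += f'<option value="{value}"{selected}>{value} {text}</option>'
--     select_html += '</select>'
--     return select_html
-- ===== SOURCE B (Python) =====
-- def subnetmask_dropdown(name, id, mask=None):
--     parts = [f'<select name="{name}" id="{id}" class="form-select" required>']
--     for p in [0] + list(range(8, 33)):
--         m = 0 if p == 0 else (0xFFFFFFFF << (32 - p)) & 0xFFFFFFFF
--         value = '.'.join(str((m >> s) & 255) for s in (24, 16, 8, 0))
--         sel = ' selected' if mask and mask == value else ''
--         parts.append(f'<option value="{value}"{sel}>{value} /{p}</option>')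
--     parts.append('</select>')
--     return ''.join(parts)
-- ===== Notes on version B (the rewrite author's own statement) =====
-- stated objective: idiomatic
-- what changed: B derives the 26 (mask, /prefix) options arithmetically from the prefix lengths [0]+range(8,33) via bit shifts and byte formatting, and builds the page as a joined list of parts, instead of A's hard-coded 26-entry literal table appended into a string.
import Mathlib
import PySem

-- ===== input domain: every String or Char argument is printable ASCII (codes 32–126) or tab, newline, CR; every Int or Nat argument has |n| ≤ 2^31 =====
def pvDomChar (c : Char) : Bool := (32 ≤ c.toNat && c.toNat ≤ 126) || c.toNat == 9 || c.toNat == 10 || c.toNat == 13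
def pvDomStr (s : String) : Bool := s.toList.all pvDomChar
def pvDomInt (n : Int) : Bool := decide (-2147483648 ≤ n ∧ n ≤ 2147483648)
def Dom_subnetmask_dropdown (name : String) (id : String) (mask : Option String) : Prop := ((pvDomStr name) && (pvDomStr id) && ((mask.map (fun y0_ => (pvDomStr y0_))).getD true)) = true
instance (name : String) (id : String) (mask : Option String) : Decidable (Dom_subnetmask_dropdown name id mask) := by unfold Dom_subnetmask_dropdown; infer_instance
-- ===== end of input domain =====

set_option maxRecDepth 4000


-- B computes the 26 (mask, /prefix) options from the prefix lengths by bit arithmetic instead of a hard-coded table (objective: idiomatic; same cost).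

-- ===== PORT A =====
def subnetmask_dropdown (name : String) (id : String) (mask : Option String) : String :=
  let options : List (String × String) :=
    [("0.0.0.0", "/0"), ("255.0.0.0", "/8"), ("255.128.0.0", "/9"),
     ("255.192.0.0", "/10"), ("255.224.0.0", "/11"), ("255.240.0.0", "/12"),
     ("255.248.0.0", "/13"), ("255.252.0.0", "/14"), ("255.254.0.0", "/15"),
     ("255.255.0.0", "/16"), ("255.255.128.0", "/17"), ("255.255.192.0", "/18"),
     ("255.255.224.0", "/19"), ("255.255.240.0", "/20"), ("255.255.248.0", "/21"),
     ("255.255.252.0", "/22"), ("255.255.254.0", "/23"), ("255.255.255.0", "/24"),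
     ("255.255.255.128", "/25"), ("255.255.255.192", "/26"), ("255.255.255.224", "/27"),
     ("255.255.255.240", "/28"), ("255.255.255.248", "/29"), ("255.255.255.252", "/30"),
     ("255.255.255.254", "/31"), ("255.255.255.255", "/32")]
  let select_html := "<select name=\"" ++ name ++ "\" id=\"" ++ id ++ "\" class=\"form-select\" required>"
  let select_html := options.foldl (fun s vt =>
    -- 'mask and mask == value': truthiness of mask (None or "" is falsy), then equality
    let selected := match mask with
      | none => ""
      | some m => if m != "" && m == vt.1 then " selected" else ""
    s ++ "<option value=\"" ++ vt.1 ++ "\"" ++ selected ++ ">" ++ vt.1 ++ " " ++ vt.2 ++ "</option>") select_html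
  select_html ++ "</select>"

-- ===== PORT B =====
-- mask integer for prefix p (Python '(0xFFFFFFFF << (32-p)) & 0xFFFFFFFF'; exact on 0 ≤ p ≤ 32, done in Nat)
def pvMaskValue (p : Int) : String :=
  let m : Nat := if p == 0 then 0 else (4294967295 <<< (32 - p).toNat) &&& 4294967295
  String.intercalate "." ([24, 16, 8, 0].map (fun s => PySem.Int.toStr (Int.ofNat ((m >>> s) &&& 255))))

def subnetmask_dropdown_alt (name : String) (id : String) (mask : Option String) : String :=
  let parts : List String :=
    ("<select name=\"" ++ name ++ "\" id=\"" ++ id ++ "\" class=\"form-select\" required>") ::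
    ((0 :: PySem.List.pyRange 8 33 1).map (fun p =>
      let value := pvMaskValue p
      let sel := match mask with
        | none => ""
        | some m => if m != "" && m == value then " selected" else ""
      "<option value=\"" ++ value ++ "\"" ++ sel ++ ">" ++ value ++ " /" ++ PySem.Int.toStr p ++ "</option>"))
  String.join (parts ++ ["</select>"])

-- ===== PRECONDITION & SPEC =====
def Spec_subnetmask_dropdown (name : String) (id : String) (mask : Option String) (out : String) : Prop := out = subnetmask_dropdown_alt name id mask
instance (name : String) (id : String) (mask : Option String) (out : String) : Decidable (Spec_subnetmask_dropdown name id mask out) := by unfold Spec_subnetmask_dropdown; infer_instance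

-- ===== CLAIM (what is proved, stated in full; the proofs are below) =====
def Claim_equal_subnetmask_dropdown : Prop := ∀ (name : String) (id : String) (mask : Option String), Dom_subnetmask_dropdown name id mask → Spec_subnetmask_dropdown name id mask (subnetmask_dropdown name id mask)

-- ===== LEMMAS AND PROOFS =====
theorem pv_range_eval : (0 : Int) :: PySem.List.pyRange 8 33 1 =
    [0,8,9,10,11,12,13,14,15,16,17,18,19,20,21,22,23,24,25,26,27,28,29,30,31,32] := by decide

-- the option body of B's loop, as a function of the precomputed (value, prefix-string) pair
def pvOpt (mask : Option String) (vt : String × String) : String :=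
  let sel := match mask with
    | none => ""
    | some m => if m != "" && m == vt.1 then " selected" else ""
  "<option value=\"" ++ vt.1 ++ "\"" ++ sel ++ ">" ++ vt.1 ++ " /" ++ vt.2 ++ "</option>"

theorem pv_vals : ([0,8,9,10,11,12,13,14,15,16,17,18,19,20,21,22,23,24,25,26,27,28,29,30,31,32] : List Int).map
    (fun p => (pvMaskValue p, PySem.Int.toStr p)) = [("0.0.0.0", "0"), ("255.0.0.0", "8"), ("255.128.0.0", "9"), ("255.192.0.0", "10"), ("255.224.0.0", "11"), ("255.240.0.0", "12"), ("255.248.0.0", "13"), ("255.252.0.0", "14"), ("255.254.0.0", "15"), ("255.255.0.0", "16"), ("255.255.128.0", "17"), ("255.255.192.0", "18"), ("255.255.224.0", "19"), ("255.255.240.0", "20"), ("255.255.248.0", "21"), ("255.255.252.0", "22"), ("255.255.254.0", "23"), ("255.255.255.0", "24"), ("255.255.255.128", "25"), ("255.255.255.192", "26"), ("255.255.255.224", "27"), ("255.255.255.240", "28"), ("255.255.255.248", "29"), ("255.255.255.252", "30"), ("255.255.255.254", "31"), ("255.255.255.255", "32")] := by decide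

theorem pv_map_eq (mask : Option String) :
    ((0 : Int) :: PySem.List.pyRange 8 33 1).map (fun p =>
      let value := pvMaskValue p
      let sel := match mask with
        | none => ""
        | some m => if m != "" && m == value then " selected" else ""
      "<option value=\"" ++ value ++ "\"" ++ sel ++ ">" ++ value ++ " /" ++ PySem.Int.toStr p ++ "</option>") =
    ([("0.0.0.0", "0"), ("255.0.0.0", "8"), ("255.128.0.0", "9"), ("255.192.0.0", "10"), ("255.224.0.0", "11"), ("255.240.0.0", "12"), ("255.248.0.0", "13"), ("255.252.0.0", "14"), ("255.254.0.0", "15"), ("255.255.0.0", "16"), ("255.255.128.0", "17"), ("255.255.192.0", "18"), ("255.255.224.0", "19"), ("255.255.240.0", "20"), ("255.255.248.0", "21"), ("255.255.252.0", "22"), ("255.255.254.0", "23"), ("255.255.255.0", "24"), ("255.255.255.128", "25"), ("255.255.255.192", "26"), ("255.255.255.224", "27"), ("255.255.255.240", "28"), ("255.255.255.248", "29"), ("255.255.255.252", "30"), ("255.255.255.254", "31"), ("255.255.255.255", "32")] : List (String × String)).map (pvOpt mask) := by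
  rw [pv_range_eval, ← pv_vals, List.map_map]
  rfl

theorem pv_main (name id : String) (mask : Option String) :
    subnetmask_dropdown name id mask = subnetmask_dropdown_alt name id mask := by
  unfold subnetmask_dropdown subnetmask_dropdown_alt
  rw [pv_map_eq]
  cases mask <;>
    simp [String.join, pvOpt, String.append_assoc] <;>
    simp [← String.append_assoc]

-- ===== VERDICT (by name: the statement is the Claim_ definition above) =====
theorem subnetmask_dropdown_spec : Claim_equal_subnetmask_dropdown := by
  intro name id mask _
  exact pv_main name id mask
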